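-- pv_equiv track=rewrite | github.com/dcdanko/minerva_barcode_deconvolution | minerva/kraken/enhance_kraken.py | promote_and_count
-- ===== SOURCE A (Python) =====
-- def promote(taxas, taxa_tree=None):
--     if taxa_tree is None:
--         taxa_tree = build_taxa_tree(taxas)
--     promoted_taxas = []
--     for taxa in taxas:
--         root = taxa_tree
--         promoted = []
--         for rank in taxa:
--             root = root[rank]
--             promoted.append(rank)
--         while len(root) == 1:
--             rank = list(root.keys())[0]
--             root = root[rank]
--             promoted.append(rank)
--         promoted_taxas.append(promoted)
--     return promoted_taxas
--
-- def build_taxa_tree(taxas):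
--     taxa_tree = {}
--     for taxa in taxas:
--         root = taxa_tree
--         for rank in taxa:
--             try:
--                 root = root[rank]
--             except KeyError:
--                 root[rank] = {}
--                 root = root[rank]
--     return taxa_tree
--
-- def promote_and_count(bx_tbl):
--     before, after  = {}, {}
--     for taxas in bx_tbl.values():
--         promoted = promote(taxas)
--         for taxa in taxas:
--             try:
--                 before[';'.join(taxa)] += 1
--             except KeyError:
--                 before[';'.join(taxa)] = 1
--         for taxa in promoted:
--             try:
--                 after[';'.join(taxa)] += 1
--             except KeyError:
--                 after[';'.join(taxa)] = 1
--     return before, after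
-- ===== SOURCE B (Python) =====
-- def _next_rank(cur, t):
--     if len(t) > len(cur) and t[:len(cur)] == cur:
--         return t[len(cur)]
--     return None
--
-- def promote_and_count(bx_tbl):
--     before, after = {}, {}
--     for taxas in bx_tbl.values():
--         for taxa in taxas:
--             k = ';'.join(taxa)
--             before[k] = before.get(k, 0) + 1
--         for taxa in taxas:
--             cur = list(taxa)
--             while True:
--                 nxt = []
--                 for t in taxas:
--                     r = _next_rank(cur, t)
--                     if r is not None and r not in nxt:
--                         nxt.append(r)
--                 if len(nxt) == 1:
--                     cur.append(nxt[0])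
--                 else:
--                     break
--             k = ';'.join(cur)
--             after[k] = after.get(k, 0) + 1
--     return before, after
-- ===== Notes on version B (the rewrite author's own statement) =====
-- stated objective: simpler
-- what changed: B drops the nested-dict taxa tree entirely (no build_taxa_tree, no rank-by-rank descent): each promotion step directly rescans the group's taxa list for the distinct next ranks extending the current path, trading the prebuilt tree for a shorter direct scan.
import Mathlib
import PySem

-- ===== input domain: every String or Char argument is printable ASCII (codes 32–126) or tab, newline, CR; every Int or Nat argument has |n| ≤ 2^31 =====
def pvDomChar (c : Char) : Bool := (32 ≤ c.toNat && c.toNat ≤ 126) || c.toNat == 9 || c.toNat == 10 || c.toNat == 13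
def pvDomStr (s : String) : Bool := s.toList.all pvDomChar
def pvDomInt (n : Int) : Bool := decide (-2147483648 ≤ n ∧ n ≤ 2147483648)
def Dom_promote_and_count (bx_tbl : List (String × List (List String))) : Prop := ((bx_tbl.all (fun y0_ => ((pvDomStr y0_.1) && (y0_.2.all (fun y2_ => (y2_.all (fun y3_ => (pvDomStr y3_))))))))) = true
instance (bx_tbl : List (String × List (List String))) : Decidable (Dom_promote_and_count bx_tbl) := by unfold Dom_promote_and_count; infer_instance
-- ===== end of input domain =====

-- B replaces A's nested-dict taxa tree by a direct per-step rescan of the group's taxa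
-- list for the distinct next ranks of the current path (simpler: no tree, no descent phase).

-- ===== PORT A =====
-- Python's nested dict tree is encoded first-child/next-sibling: a node's dict is the
-- sibling chain `cons key child rest`, chain order = dict insertion order; this is exact
-- (lookup, insertion-at-end, len(root) = chain length, list(root.keys())[0] = first key).
inductive PvTrie : Type where
  | leaf : PvTrie
  | cons : String → PvTrie → PvTrie → PvTrie
deriving DecidableEq, Repr

-- root[rank] lookup in a node's dict
def pvGetChild : PvTrie → String → Option PvTrie
  | .leaf, _ => none
  | .cons k c rest, r => if k = r then some c else pvGetChild rest r

-- root[rank] = c : overwrite in place, new key appended at the end (dict semantics)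
def pvSetChild : PvTrie → String → PvTrie → PvTrie
  | .leaf, r, c => .cons r c .leaf
  | .cons k c0 rest, r, c => if k = r then .cons k c rest else .cons k c0 (pvSetChild rest r c)

-- build_taxa_tree's inner loop: descend with get-or-create {} (functional rebuild of the mutation)
def pvInsTaxa : PvTrie → List String → PvTrie
  | t, [] => t
  | t, r :: rs => pvSetChild t r (pvInsTaxa ((pvGetChild t r).getD .leaf) rs)

-- build_taxa_tree
def pvBuildTree (taxas : List (List String)) : PvTrie := taxas.foldl pvInsTaxa .leaf

-- promote's first loop: for rank in taxa: root = root[rank]; promoted.append(rank)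
-- (none = KeyError; unreachable here since the tree is built from the same taxas)
def pvDescend : PvTrie → List String → List String → Option (PvTrie × List String)
  | t, [], acc => some (t, acc)
  | t, r :: rs, acc =>
    match pvGetChild t r with
    | some c => pvDescend c rs (acc ++ [r])
    | none => none

-- promote's while loop: `len(root) == 1` is exactly the shape `cons r c leaf`;
-- fuel only makes the loop total (chains are bounded by the longest taxa, see pvFuel)
def pvChaseA : Nat → PvTrie → List String → List String
  | 0, _, acc => acc
  | fuel + 1, n, acc =>
    match n with
    | .cons r c .leaf => pvChaseA fuel c (acc ++ [r])
    | _ => acc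

def pvFuel (taxas : List (List String)) : Nat := (taxas.map List.length).sum + 1

-- promote (body for one taxa)
def pvPromoteOne (tree : PvTrie) (fuel : Nat) (taxa : List String) : List String :=
  match pvDescend tree taxa [] with
  | some (n, acc) => pvChaseA fuel n acc
  | none => taxa   -- unreachable (KeyError cannot occur: taxa ∈ taxas)

-- promote
def pvPromoteA (taxas : List (List String)) : List (List String) :=
  taxas.map (pvPromoteOne (pvBuildTree taxas) (pvFuel taxas))

-- try d[k] += 1 except KeyError: d[k] = 1
def pvCountInto (d : PySem.Dict String Int) (ts : List (List String)) : PySem.Dict String Int :=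
  ts.foldl (fun d t => let k := PySem.Str.join ";" t; d.insert k (d.getD k 0 + 1)) d

def promote_and_count (bx_tbl : List (String × List (List String))) : (List (String × Int)) × (List (String × Int)) :=
  let ba := ((PySem.Dict.ofList bx_tbl).values).foldl
    (fun (ba : PySem.Dict String Int × PySem.Dict String Int) taxas =>
      (pvCountInto ba.1 taxas, pvCountInto ba.2 (pvPromoteA taxas)))
    (.empty, .empty)
  (ba.1.items, ba.2.items)

-- ===== PORT B =====
-- _next_rank(cur, t): t[len(cur)] if t is a proper extension of cur, else None
-- (take/drop form is exact: t[:len(cur)] == cur and len(t) > len(cur) ⟺ take = cur and drop nonempty)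
def pvNextRank (cur t : List String) : Option String :=
  if t.take cur.length = cur then (t.drop cur.length).head? else none

-- the inner for-loop building nxt (distinct next ranks, first-occurrence order)
def pvNexts (taxas : List (List String)) (cur : List String) : List String :=
  taxas.foldl (fun acc t =>
    match pvNextRank cur t with
    | some r => if r ∈ acc then acc else acc ++ [r]
    | none => acc) []

-- the while True loop (fuel only makes it total; chains bounded by the longest taxa)
def pvChaseB (taxas : List (List String)) : Nat → List String → List String
  | 0, cur => cur
  | fuel + 1, cur =>
    match pvNexts taxas cur with
    | [r] => pvChaseB taxas fuel (cur ++ [r])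
    | _ => cur

-- d[k] = d.get(k, 0) + 1
def pvCountIntoB (d : PySem.Dict String Int) (ts : List (List String)) : PySem.Dict String Int :=
  ts.foldl (fun d t => let k := PySem.Str.join ";" t; d.insert k (d.getD k 0 + 1)) d

def promote_and_count_alt (bx_tbl : List (String × List (List String))) : (List (String × Int)) × (List (String × Int)) :=
  let ba := ((PySem.Dict.ofList bx_tbl).values).foldl
    (fun (ba : PySem.Dict String Int × PySem.Dict String Int) taxas =>
      (pvCountIntoB ba.1 taxas,
       pvCountIntoB ba.2 (taxas.map (fun taxa => pvChaseB taxas (pvFuel taxas) taxa))))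
    (.empty, .empty)
  (ba.1.items, ba.2.items)

-- ===== PRECONDITION & SPEC =====
def Spec_promote_and_count (bx_tbl : List (String × List (List String))) (out : (List (String × Int)) × (List (String × Int))) : Prop := out = promote_and_count_alt bx_tbl
instance (bx_tbl : List (String × List (List String))) (out : (List (String × Int)) × (List (String × Int))) : Decidable (Spec_promote_and_count bx_tbl out) := by unfold Spec_promote_and_count; infer_instance

-- ===== CLAIM (what is proved, stated in full; the proofs are below) =====
def Claim_equal_promote_and_count : Prop := ∀ (bx_tbl : List (String × List (List String))), Dom_promote_and_count bx_tbl → Spec_promote_and_count bx_tbl (promote_and_count bx_tbl)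

-- ===== LEMMAS AND PROOFS =====

-- list(root.keys())
def pvChildKeys : PvTrie → List String
  | .leaf => []
  | .cons k _ rest => k :: pvChildKeys rest

-- node of the tree at path p (root[p0][p1]…)
def pvSub : PvTrie → List String → Option PvTrie
  | t, [] => some t
  | t, r :: rs => (pvGetChild t r).bind (fun c => pvSub c rs)

-- children of the node at path p, [] when there is no node
def pvChK (t : PvTrie) (p : List String) : List String :=
  ((pvSub t p).map pvChildKeys).getD []

theorem pvGetChild_isSome_of_mem (t : PvTrie) (r : String) (h : r ∈ pvChildKeys t) :
    (pvGetChild t r).isSome := by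
  induction t with
  | leaf => simp [pvChildKeys] at h
  | cons k c rest ihc ihr =>
    by_cases hk : k = r
    · simp [pvGetChild, hk]
    · have hr : r ∈ pvChildKeys rest := by
        simp [pvChildKeys] at h
        rcases h with h | h
        · exact absurd h.symm hk
        · exact h
      simpa [pvGetChild, hk] using ihr hr

theorem pvGetChild_setChild (t : PvTrie) (r q : String) (c : PvTrie) :
    pvGetChild (pvSetChild t r c) q = if r = q then some c else pvGetChild t q := by
  induction t with
  | leaf =>
    by_cases h : r = q <;> simp [pvSetChild, pvGetChild, h]
  | cons k c0 rest ihc ihr =>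
    by_cases hk : k = r
    · subst hk
      by_cases h : k = q <;> simp [pvSetChild, pvGetChild, h]
    · by_cases h : k = q
      · subst h
        simp [pvSetChild, hk, pvGetChild, Ne.symm hk]
      · simp [pvSetChild, hk, pvGetChild, h, ihr]

theorem pvChildKeys_setChild (t : PvTrie) (r : String) (c : PvTrie) :
    pvChildKeys (pvSetChild t r c) =
      if r ∈ pvChildKeys t then pvChildKeys t else pvChildKeys t ++ [r] := by
  induction t with
  | leaf => simp [pvSetChild, pvChildKeys]
  | cons k c0 rest ihc ihr =>
    by_cases hk : k = r
    · simp [pvSetChild, hk, pvChildKeys]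
    · by_cases hm : r ∈ pvChildKeys rest <;>
        simp [pvSetChild, hk, pvChildKeys, ihr, Ne.symm hk, hm]

theorem pvChK_leaf (p : List String) : pvChK .leaf p = [] := by
  rcases p with _ | ⟨r, rs⟩ <;> simp [pvChK, pvSub, pvChildKeys, pvGetChild]

-- the effect of pvNextRank on a cons path / cons taxa
theorem pvNextRank_cons (q : String) (p rs : List String) :
    pvNextRank (q :: p) (q :: rs) = pvNextRank p rs := by
  simp [pvNextRank]

theorem pvNextRank_cons_ne (q r : String) (p rs : List String) (h : r ≠ q) :
    pvNextRank (q :: p) (r :: rs) = none := by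
  simp [pvNextRank]
  intro hc
  exact absurd hc h

theorem pvNextRank_nil_taxa (p : List String) : pvNextRank p [] = none := by
  cases p <;> simp [pvNextRank]

-- single-insert effect on children at every path  (the crux step)
theorem pvChK_insTaxa (t : List String) : ∀ (T : PvTrie) (p : List String),
    pvChK (pvInsTaxa T t) p =
      (match pvNextRank p t with
       | some r => if r ∈ pvChK T p then pvChK T p else pvChK T p ++ [r]
       | none => pvChK T p) := by
  induction t with
  | nil =>
    intro T p
    simp [pvInsTaxa, pvNextRank_nil_taxa]
  | cons r rs ih =>
    intro T p
    rcases p with _ | ⟨q, p'⟩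
    · -- p = []
      simp only [pvInsTaxa, pvChK, pvSub, Option.map_some, Option.getD_some]
      rw [pvChildKeys_setChild]
      simp [pvNextRank]
    · -- p = q :: p'
      simp only [pvInsTaxa, pvChK, pvSub]
      rw [pvGetChild_setChild]
      by_cases hq : r = q
      · subst hq
        rw [pvNextRank_cons, if_pos rfl]
        have hL : (((some (pvInsTaxa ((pvGetChild T r).getD .leaf) rs)).bind
              (fun c => pvSub c p')).map pvChildKeys).getD [] =
            pvChK (pvInsTaxa ((pvGetChild T r).getD .leaf) rs) p' := by
          simp [pvChK]
        rw [hL, ih]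
        have hT2 : (((pvGetChild T r).bind (fun c => pvSub c p')).map pvChildKeys).getD [] =
            pvChK ((pvGetChild T r).getD .leaf) p' := by
          cases hg : pvGetChild T r with
          | none => cases p' <;> simp [pvChK, pvSub, pvGetChild, pvChildKeys]
          | some c => simp [pvChK]
        rw [hT2]
      · rw [pvNextRank_cons_ne q r p' rs hq, if_neg hq]

-- children at every path of the built tree = B's nxt list  (main invariant)
theorem pvChK_foldl (ts : List (List String)) : ∀ (T : PvTrie) (f : List String → List String),
    (∀ p, pvChK T p = f p) →
    ∀ p, pvChK (ts.foldl pvInsTaxa T) p =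
      ts.foldl (fun acc t =>
        match pvNextRank p t with
        | some r => if r ∈ acc then acc else acc ++ [r]
        | none => acc) (f p) := by
  induction ts with
  | nil => intro T f hf p; simpa [List.foldl] using hf p
  | cons t ts ih =>
    intro T f hf p
    simp only [List.foldl]
    exact ih (pvInsTaxa T t)
      (fun p => match pvNextRank p t with
        | some r => if r ∈ f p then f p else f p ++ [r]
        | none => f p)
      (fun p => by rw [pvChK_insTaxa, hf p])
      p

theorem pvChK_build (taxas : List (List String)) (p : List String) :
    pvChK (pvBuildTree taxas) p = pvNexts taxas p := by
  unfold pvBuildTree pvNexts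
  exact pvChK_foldl taxas .leaf (fun _ => []) (fun p => pvChK_leaf p) p

-- pvSub along an appended rank
theorem pvSub_append (p : List String) : ∀ (T : PvTrie) (r : String),
    pvSub T (p ++ [r]) = (pvSub T p).bind (fun n => pvGetChild n r) := by
  induction p with
  | nil => intro T r; simp [pvSub]
  | cons q p' ih =>
    intro T r
    simp only [List.cons_append, pvSub]
    cases pvGetChild T q with
    | none => simp
    | some c => simp [ih c r]

-- r ∈ nxt whenever some taxa yields r at cur
theorem pvMem_nexts (p : List String) (r : String) :
    ∀ (ts : List (List String)) (acc : List String),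
    (r ∈ acc ∨ ∃ t ∈ ts, pvNextRank p t = some r) →
    r ∈ ts.foldl (fun acc t =>
      match pvNextRank p t with
      | some r => if r ∈ acc then acc else acc ++ [r]
      | none => acc) acc := by
  intro ts
  induction ts with
  | nil => intro acc h; simpa using h.resolve_right (by simp)
  | cons t ts ih =>
    intro acc h
    simp only [List.foldl]
    rcases h with h | ⟨u, hu, hnr⟩
    · apply ih; left
      cases hnr : pvNextRank p t with
      | none => exact h
      | some s => by_cases hs : s ∈ acc <;> simp [hs, h]
    · rcases List.mem_cons.mp hu with rfl | hu
      · apply ih; left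
        rw [hnr]
        by_cases hr : r ∈ acc <;> simp [hr]
      · exact ih _ (Or.inr ⟨u, hu, hnr⟩)

-- the node at every prefix of a member taxa exists
theorem pvSub_isSome (taxas : List (List String)) :
    ∀ (suf pre : List String), (pre ++ suf) ∈ taxas →
    (pvSub (pvBuildTree taxas) pre).isSome →
    (pvSub (pvBuildTree taxas) (pre ++ suf)).isSome := by
  intro suf
  induction suf with
  | nil => intro pre h hs; simpa using hs
  | cons r suf' ih =>
    intro pre hmem hs
    rcases Option.isSome_iff_exists.mp hs with ⟨n, hn⟩
    have hr : r ∈ pvChildKeys n := by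
      have h1 : pvChK (pvBuildTree taxas) pre = pvNexts taxas pre := pvChK_build taxas pre
      have h2 : pvChK (pvBuildTree taxas) pre = pvChildKeys n := by simp [pvChK, hn]
      rw [h2] at h1
      rw [h1]
      apply pvMem_nexts
      right
      refine ⟨pre ++ r :: suf', hmem, ?_⟩
      simp [pvNextRank]
    have hg : (pvGetChild n r).isSome := pvGetChild_isSome_of_mem n r hr
    have hstep : (pvSub (pvBuildTree taxas) (pre ++ [r])).isSome := by
      rw [pvSub_append, hn]
      simpa using hg
    have := ih (pre ++ [r]) (by simpa using hmem) hstep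
    simpa using this

-- descend = pvSub with the accumulated path
theorem pvDescend_eq (rs : List String) : ∀ (t : PvTrie) (acc : List String),
    pvDescend t rs acc = (pvSub t rs).map (fun n => (n, acc ++ rs)) := by
  induction rs with
  | nil => intro t acc; simp [pvDescend, pvSub]
  | cons r rs' ih =>
    intro t acc
    simp only [pvDescend, pvSub]
    cases pvGetChild t r with
    | none => simp
    | some c => simp [ih c (acc ++ [r])]

-- A's while loop over the tree = B's while loop over the list (same fuel)
theorem pvChase_eq (taxas : List (List String)) :
    ∀ (fuel : Nat) (p : List String) (n : PvTrie),
    pvSub (pvBuildTree taxas) p = some n →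
    pvChaseA fuel n p = pvChaseB taxas fuel p := by
  intro fuel
  induction fuel with
  | zero => intro p n _; simp [pvChaseA, pvChaseB]
  | succ f ih =>
    intro p n hn
    have hk : pvChildKeys n = pvNexts taxas p := by
      have h := pvChK_build taxas p
      simpa [pvChK, hn] using h
    cases n with
    | leaf =>
      have : pvNexts taxas p = [] := by rw [← hk]; rfl
      simp [pvChaseA, pvChaseB, this]
    | cons r c rest =>
      cases rest with
      | leaf =>
        have hx : pvNexts taxas p = [r] := by rw [← hk]; rfl
        have hc : pvSub (pvBuildTree taxas) (p ++ [r]) = some c := by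
          rw [pvSub_append, hn]
          simp [pvGetChild]
        simp only [pvChaseA, pvChaseB, hx]
        exact ih (p ++ [r]) c hc
      | cons k2 c2 rest2 =>
        have hx : pvNexts taxas p = r :: k2 :: pvChildKeys rest2 := by rw [← hk]; rfl
        simp [pvChaseA, pvChaseB, hx]

-- promote (A) = B's per-taxa chase
theorem pvPromoteA_eq (taxas : List (List String)) :
    pvPromoteA taxas = taxas.map (fun taxa => pvChaseB taxas (pvFuel taxas) taxa) := by
  unfold pvPromoteA
  apply List.map_congr_left
  intro taxa hmem
  have hsome : (pvSub (pvBuildTree taxas) taxa).isSome := by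
    have := pvSub_isSome taxas taxa [] (by simpa using hmem) (by simp [pvSub])
    simpa using this
  rcases Option.isSome_iff_exists.mp hsome with ⟨n, hn⟩
  unfold pvPromoteOne
  rw [pvDescend_eq, hn]
  simpa using pvChase_eq taxas (pvFuel taxas) taxa n hn

-- ===== VERDICT (by name: the statement is the Claim_ definition above) =====
theorem promote_and_count_spec : Claim_equal_promote_and_count := by
  intro bx_tbl _
  unfold Spec_promote_and_count promote_and_count promote_and_count_alt
  have hfun : (fun (ba : PySem.Dict String Int × PySem.Dict String Int) taxas =>
        (pvCountInto ba.1 taxas, pvCountInto ba.2 (pvPromoteA taxas)))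
      = (fun (ba : PySem.Dict String Int × PySem.Dict String Int) taxas =>
        (pvCountIntoB ba.1 taxas,
         pvCountIntoB ba.2 (taxas.map (fun taxa => pvChaseB taxas (pvFuel taxas) taxa)))) := by
    funext ba taxas
    rw [pvPromoteA_eq]
    rfl
  rw [hfun]
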